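-- pv_equiv track=rewrite | github.com/22310230A/IA_P2 | Lógica/Planificación/0040_Redes_Jerarquicas_Tareas.py | descomponer
-- ===== SOURCE A (Python) =====
-- def descomponer(tarea, tareas, tareas_atomicas):
--     if tarea in tareas_atomicas:
--         return [tarea]
--     subtareas = tareas.get(tarea, [])
--     plan = []
--     for sub in subtareas:
--         plan.extend(descomponer(sub, tareas, tareas_atomicas))
--     return plan
-- ===== SOURCE B (Python) =====
-- def descomponer(tarea, tareas, tareas_atomicas):
--     # Iterative explicit-stack preorder traversal instead of recursion.
--     resultado = []
--     pila = [tarea]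
--     while pila:
--         t = pila.pop()
--         if t in tareas_atomicas:
--             resultado.append(t)
--         else:
--             pila.extend(reversed(tareas.get(t, [])))
--     return resultado
-- ===== Notes on version B (the rewrite author's own statement) =====
-- stated objective: alternative
-- what changed: Replaces the recursive decomposition by an iterative explicit-stack preorder traversal (pop a task; emit it if atomic, else push its subtasks in reversed order), removing all recursion.
import Mathlib
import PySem

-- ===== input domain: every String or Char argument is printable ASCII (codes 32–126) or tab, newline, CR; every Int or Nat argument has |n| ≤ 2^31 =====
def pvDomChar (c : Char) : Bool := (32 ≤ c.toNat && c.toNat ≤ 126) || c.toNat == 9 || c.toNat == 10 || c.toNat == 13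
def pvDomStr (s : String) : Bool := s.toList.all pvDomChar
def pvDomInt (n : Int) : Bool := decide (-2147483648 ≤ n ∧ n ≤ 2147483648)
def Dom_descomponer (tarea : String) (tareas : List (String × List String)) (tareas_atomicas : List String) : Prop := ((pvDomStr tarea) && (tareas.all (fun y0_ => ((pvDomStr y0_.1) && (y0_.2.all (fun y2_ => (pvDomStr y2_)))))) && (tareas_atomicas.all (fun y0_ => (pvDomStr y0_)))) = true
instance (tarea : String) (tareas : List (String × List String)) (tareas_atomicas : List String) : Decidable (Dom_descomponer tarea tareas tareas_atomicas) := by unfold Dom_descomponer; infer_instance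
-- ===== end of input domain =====

-- B replaces A's recursion by an iterative explicit-stack preorder traversal (objective: alternative, same cost).

-- ===== PORT A =====
-- tareas.get(t, []) on the association-list dict (first match = Python dict lookup)
def pvGetSubs (tareas : List (String × List String)) (t : String) : List String :=
  PySem.Dict.getD ⟨tareas⟩ t []

-- literal transliteration of A's recursion; the fuel only makes the recursion structural
-- (inside Pre_ the recursion depth is bounded, so the 0-fuel branch is never taken)
def pvDescA (tareas : List (String × List String)) (atom : List String) : Nat → String → List String
  | 0, _ => []
  | f + 1, tarea =>
    if atom.contains tarea then [tarea]
    else (pvGetSubs tareas tarea).foldl (fun plan sub => plan ++ pvDescA tareas atom f sub) []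

def descomponer (tarea : String) (tareas : List (String × List String)) (tareas_atomicas : List String) : List String :=
  pvDescA tareas tareas_atomicas (tareas.length + 3) tarea

-- ===== PORT B =====
def pvMaxKids (tareas : List (String × List String)) : Nat :=
  (tareas.map (fun p => p.2.length)).foldl max 0

-- B's while-loop; the stack is kept top-first, so Python's pila.pop() is the head and
-- pila.extend(reversed(cs)) prepends cs.  The fuel counts loop iterations; it only makes the
-- loop structural (inside Pre_ the bound passed below is never exhausted).
def pvLoopB (tareas : List (String × List String)) (atom : List String) : Nat → List String → List String → List String
  | _, [], acc => acc
  | 0, _ :: _, acc => acc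
  | f + 1, t :: rest, acc =>
    if atom.contains t then pvLoopB tareas atom f rest (acc ++ [t])
    else pvLoopB tareas atom f (pvGetSubs tareas t ++ rest) acc

def descomponer_alt (tarea : String) (tareas : List (String × List String)) (tareas_atomicas : List String) : List String :=
  pvLoopB tareas tareas_atomicas ((pvMaxKids tareas + 1) ^ (tareas.length + 2)) [tarea] []

-- ===== PRECONDITION & SPEC =====
-- helpers Pre_ is phrased with: the successor map of the task graph, the set of nodes reachable
-- from tarea (an iterated closure that provably reaches a fixpoint), and the longest-path
-- functional pvLp (pvLp k t = length of the longest decomposition chain from t using at most k steps)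
def pvSucc (tareas : List (String × List String)) (atom : List String) (t : String) : List String :=
  if t ∈ atom then [] else pvGetSubs tareas t

def pvIns (acc : List String) (c : String) : List String :=
  if c ∈ acc then acc else acc ++ [c]

def pvStep (tareas : List (String × List String)) (atom : List String) (S : List String) : List String :=
  (S.flatMap (pvSucc tareas atom)).foldl pvIns S

def pvCl (tareas : List (String × List String)) (atom : List String) : Nat → List String → List String
  | 0, S => S
  | k + 1, S => if pvStep tareas atom S = S then S else pvCl tareas atom k (pvStep tareas atom S)

def pvReachSet (tarea : String) (tareas : List (String × List String)) (atom : List String) : List String :=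
  pvCl tareas atom ((tareas.flatMap Prod.snd).length + 1) [tarea]

def pvLp (tareas : List (String × List String)) (atom : List String) : Nat → String → Nat
  | 0, _ => 0
  | k + 1, t => ((pvSucc tareas atom t).map (fun c => pvLp tareas atom k c + 1)).foldl max 0

-- Pre_ excludes exactly the inputs on which Python A raises RecursionError: those whose task
-- graph has a cycle reachable from tarea.  It is stated as a property of the input graph (the
-- longest-path functional is already stable on the part reachable from tarea — i.e. that part is
-- acyclic), not as a simulation of either program; on every acyclic-reachable input A returns.
def Pre_descomponer (tarea : String) (tareas : List (String × List String)) (tareas_atomicas : List String) : Prop :=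
  ∀ t ∈ pvReachSet tarea tareas tareas_atomicas,
    pvLp tareas tareas_atomicas (tareas.length + 2) t = pvLp tareas tareas_atomicas (tareas.length + 1) t
instance (tarea : String) (tareas : List (String × List String)) (tareas_atomicas : List String) : Decidable (Pre_descomponer tarea tareas tareas_atomicas) := by unfold Pre_descomponer; infer_instance

def pvWitness_descomponer : String × (List (String × List String)) × List String :=
  ("a", [("a", ["b", "c"]), ("b", ["c"])], ["c"])

def Spec_descomponer (tarea : String) (tareas : List (String × List String)) (tareas_atomicas : List String) (out : List String) : Prop := out = descomponer_alt tarea tareas tareas_atomicas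
instance (tarea : String) (tareas : List (String × List String)) (tareas_atomicas : List String) (out : List String) : Decidable (Spec_descomponer tarea tareas tareas_atomicas out) := by unfold Spec_descomponer; infer_instance

-- ===== CLAIM (what is proved, stated in full; the proofs are below) =====
def Claim_equal_descomponer : Prop := ∀ (tarea : String) (tareas : List (String × List String)) (tareas_atomicas : List String), Dom_descomponer tarea tareas tareas_atomicas → Pre_descomponer tarea tareas tareas_atomicas → Spec_descomponer tarea tareas tareas_atomicas (descomponer tarea tareas tareas_atomicas)

-- ===== LEMMAS AND PROOFS =====

-- generic facts about the foldl-insert closure step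
lemma pvMem_foldl_pvIns (L : List String) : ∀ acc x, x ∈ acc → x ∈ L.foldl pvIns acc := by
  induction L with
  | nil => intro acc x hx; simpa using hx
  | cons c L ih =>
    intro acc x hx
    simp only [List.foldl_cons]
    apply ih
    unfold pvIns; split
    · exact hx
    · exact List.mem_append_left _ hx

lemma pvLen_le_foldl_pvIns (L : List String) : ∀ acc, acc.length ≤ (L.foldl pvIns acc).length := by
  induction L with
  | nil => intro acc; simp
  | cons c L ih =>
    intro acc
    simp only [List.foldl_cons]
    refine le_trans ?_ (ih (pvIns acc c))
    unfold pvIns; split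
    · exact le_refl _
    · simp

lemma pvFoldl_pvIns_eq_self (L : List String) : ∀ acc, L.foldl pvIns acc = acc → ∀ c ∈ L, c ∈ acc := by
  induction L with
  | nil => intro acc _ c hc; simp at hc
  | cons d L ih =>
    intro acc heq c hc
    simp only [List.foldl_cons] at heq
    by_cases hd : d ∈ acc
    · have heq' : L.foldl pvIns acc = acc := by
        unfold pvIns at heq; rw [if_pos hd] at heq; exact heq
      rcases List.mem_cons.1 hc with rfl | hc'
      · exact hd
      · exact ih acc heq' c hc'
    · exfalso
      have h1 : pvIns acc d = acc ++ [d] := by unfold pvIns; rw [if_neg hd]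
      have h2 := pvLen_le_foldl_pvIns L (pvIns acc d)
      rw [heq, h1] at h2
      have h3 : (acc ++ [d]).length = acc.length + 1 := by simp
      omega

lemma pvFoldl_pvIns_append (L : List String) : ∀ acc, ∃ E, L.foldl pvIns acc = acc ++ E := by
  induction L with
  | nil => intro acc; exact ⟨[], by simp⟩
  | cons c L ih =>
    intro acc
    simp only [List.foldl_cons]
    unfold pvIns; split
    · exact ih acc
    · obtain ⟨E, hE⟩ := ih (acc ++ [c])
      exact ⟨c :: E, by simpa using hE⟩

lemma pvNodup_foldl_pvIns (L : List String) : ∀ acc, acc.Nodup → (L.foldl pvIns acc).Nodup := by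
  induction L with
  | nil => intro acc h; simpa using h
  | cons c L ih =>
    intro acc h
    simp only [List.foldl_cons]
    apply ih
    unfold pvIns; split
    · exact h
    · rename_i hc
      exact List.Nodup.append h (List.nodup_singleton c)
        (fun a ha he => by simp at he; exact hc (he ▸ ha))

lemma pvMem_foldl_pvIns_orig (L : List String) : ∀ acc x, x ∈ L.foldl pvIns acc → x ∈ acc ∨ x ∈ L := by
  induction L with
  | nil => intro acc x hx; left; simpa using hx
  | cons c L ih =>
    intro acc x hx
    simp only [List.foldl_cons] at hx
    rcases ih (pvIns acc c) x hx with h | h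
    · unfold pvIns at h; split at h
      · left; exact h
      · rcases List.mem_append.1 h with h | h
        · left; exact h
        · right; simp at h; simp [h]
    · right; exact List.mem_cons_of_mem _ h

-- elements produced by pvSucc lie in the universe of listed subtasks
lemma pvSucc_subset_univ (tareas : List (String × List String)) (atom : List String)
    (t c : String) (hc : c ∈ pvSucc tareas atom t) : c ∈ tareas.flatMap Prod.snd := by
  unfold pvSucc at hc
  split at hc
  · simp at hc
  · unfold pvGetSubs PySem.Dict.getD PySem.Dict.get? at hc
    rcases hfind : tareas.find? (fun p => p.1 == t) with _ | pr
    · simp [hfind] at hc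
    · simp only [hfind, Option.map_some, Option.getD_some] at hc
      exact List.mem_flatMap.2 ⟨pr, List.mem_of_find?_eq_some hfind, hc⟩

-- the closure is closed under pvStep once its fuel exceeds the universe size
lemma pvCl_closed (tareas : List (String × List String)) (atom : List String)
    (V : List String) (hV : ∀ c ∈ tareas.flatMap Prod.snd, c ∈ V) :
    ∀ k S, S.Nodup → (∀ x ∈ S, x ∈ V) → V.length < k + S.length →
      pvStep tareas atom (pvCl tareas atom k S) = pvCl tareas atom k S := by
  intro k
  induction k with
  | zero =>
    intro S hnd hsub hlen
    exfalso
    have : S.length ≤ V.length := (List.Nodup.subperm hnd hsub).length_le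
    omega
  | succ k ih =>
    intro S hnd hsub hlen
    by_cases hfix : pvStep tareas atom S = S
    · simp only [pvCl, if_pos hfix]; exact hfix
    · simp only [pvCl, if_neg hfix]
      apply ih
      · exact pvNodup_foldl_pvIns _ _ hnd
      · intro x hx
        rcases pvMem_foldl_pvIns_orig _ _ _ hx with h | h
        · exact hsub x h
        · obtain ⟨t, ht, hc⟩ := List.mem_flatMap.1 h
          exact hV x (pvSucc_subset_univ tareas atom t x hc)
      · obtain ⟨E, hE⟩ := pvFoldl_pvIns_append (S.flatMap (pvSucc tareas atom)) S
        have hEne : E ≠ [] := by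
          intro h; rw [h] at hE; simp at hE; exact hfix (by unfold pvStep; simpa using hE)
        have : S.length + 1 ≤ (pvStep tareas atom S).length := by
          unfold pvStep; rw [hE]
          have : 1 ≤ E.length := List.length_pos_iff.2 hEne
          simp; omega
        omega

lemma pvReachSet_closed (tarea : String) (tareas : List (String × List String)) (atom : List String) :
    pvStep tareas atom (pvReachSet tarea tareas atom) = pvReachSet tarea tareas atom := by
  unfold pvReachSet
  apply pvCl_closed tareas atom (tarea :: tareas.flatMap Prod.snd)
  · intro c hc; exact List.mem_cons_of_mem _ hc
  · simp
  · intro x hx; simpa using Or.inl (by simpa using hx)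
  · simp

lemma pvMem_pvCl_self (tareas : List (String × List String)) (atom : List String) :
    ∀ k S x, x ∈ S → x ∈ pvCl tareas atom k S := by
  intro k
  induction k with
  | zero => intro S x hx; simpa [pvCl] using hx
  | succ k ih =>
    intro S x hx
    simp only [pvCl]; split
    · exact hx
    · exact ih _ x (pvMem_foldl_pvIns _ _ _ hx)

lemma pvTarea_mem_reach (tarea : String) (tareas : List (String × List String)) (atom : List String) :
    tarea ∈ pvReachSet tarea tareas atom :=
  pvMem_pvCl_self tareas atom _ [tarea] tarea (by simp)

lemma pvReach_succ (tarea : String) (tareas : List (String × List String)) (atom : List String)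
    (t c : String) (ht : t ∈ pvReachSet tarea tareas atom) (hc : c ∈ pvSucc tareas atom t) :
    c ∈ pvReachSet tarea tareas atom := by
  have hclosed := pvReachSet_closed tarea tareas atom
  unfold pvStep at hclosed
  exact pvFoldl_pvIns_eq_self _ _ hclosed c (List.mem_flatMap.2 ⟨t, ht, hc⟩)

-- longest-path facts
lemma pvFoldl_max_le (L : List Nat) : ∀ a m, a ≤ m → (∀ x ∈ L, x ≤ m) → L.foldl max a ≤ m := by
  induction L with
  | nil => intro a m ha _; simpa using ha
  | cons x L ih =>
    intro a m ha hL
    simp only [List.foldl_cons]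
    exact ih _ m (max_le ha (hL x (by simp))) (fun y hy => hL y (by simp [hy]))

lemma pvLp_le (tareas : List (String × List String)) (atom : List String) :
    ∀ k t, pvLp tareas atom k t ≤ k := by
  intro k
  induction k with
  | zero => intro t; simp [pvLp]
  | succ k ih =>
    intro t
    apply pvFoldl_max_le
    · omega
    · intro x hx
      obtain ⟨c, _, rfl⟩ := List.mem_map.1 hx
      have := ih c; omega

lemma pvLp_child_lt (tareas : List (String × List String)) (atom : List String)
    (k : Nat) (t c : String) (hc : c ∈ pvSucc tareas atom t) :
    pvLp tareas atom k c + 1 ≤ pvLp tareas atom (k + 1) t := by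
  simp only [pvLp]
  exact (PySem.List.le_foldl_max _ 0).2 _ (List.mem_map_of_mem hc)

-- the measure: pvLp at fuel n+1; under Pre_ it strictly decreases from a reachable task to its subtasks
lemma pvMeasure_lt (tarea : String) (tareas : List (String × List String)) (atom : List String)
    (hPre : Pre_descomponer tarea tareas atom)
    (t c : String) (ht : t ∈ pvReachSet tarea tareas atom) (hat : t ∉ atom)
    (hc : c ∈ pvGetSubs tareas t) :
    c ∈ pvReachSet tarea tareas atom ∧
      pvLp tareas atom (tareas.length + 1) c < pvLp tareas atom (tareas.length + 1) t := by
  have hcs : c ∈ pvSucc tareas atom t := by unfold pvSucc; rw [if_neg hat]; exact hc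
  refine ⟨pvReach_succ tarea tareas atom t c ht hcs, ?_⟩
  have h1 := pvLp_child_lt tareas atom (tareas.length + 1) t c hcs
  have h2 := hPre t ht
  simp only [show tareas.length + 1 + 1 = tareas.length + 2 from rfl] at h1
  omega

-- the two unfoldings of A's recursion at positive fuel
lemma pvDescA_succ_mem (tareas : List (String × List String)) (atom : List String)
    (f : Nat) (t : String) (hat : t ∈ atom) :
    pvDescA tareas atom (f + 1) t = [t] := by
  simp [pvDescA, hat]

lemma pvDescA_pos_mem (tareas : List (String × List String)) (atom : List String)
    (f : Nat) (hf : 1 ≤ f) (t : String) (hat : t ∈ atom) :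
    pvDescA tareas atom f t = [t] := by
  obtain ⟨f', rfl⟩ := Nat.exists_eq_add_of_le hf
  rw [Nat.add_comm]
  exact pvDescA_succ_mem tareas atom f' t hat

lemma pvDescA_succ_not_mem (tareas : List (String × List String)) (atom : List String)
    (f : Nat) (t : String) (hat : t ∉ atom) :
    pvDescA tareas atom (f + 1) t =
      ((pvGetSubs tareas t).map (pvDescA tareas atom f)).flatten := by
  have hcont : atom.contains t = false := by simpa using hat
  simp only [pvDescA, hcont, Bool.false_eq_true, if_false]
  rw [PySem.List.foldl_append_eq_flatMap]
  simp [List.flatMap_def]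

-- depth bound of a task: 0 if atomic, measure+1 otherwise
def pvDelta (tareas : List (String × List String)) (atom : List String) (t : String) : Nat :=
  if t ∈ atom then 0 else pvLp tareas atom (tareas.length + 1) t + 1

-- fuel does not matter once it exceeds pvDelta (for reachable tasks)
lemma pvDescA_stab (tarea : String) (tareas : List (String × List String))
    (atom : List String) (hPre : Pre_descomponer tarea tareas atom) :
    ∀ f g t, t ∈ pvReachSet tarea tareas atom →
      pvDelta tareas atom t < f → pvDelta tareas atom t < g →
      pvDescA tareas atom f t = pvDescA tareas atom g t := by
  intro f
  induction f with
  | zero => intro g t _ h; omega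
  | succ f ih =>
    intro g t ht hf hg
    rcases g with _ | g
    · omega
    by_cases hat : t ∈ atom
    · rw [pvDescA_succ_mem tareas atom f t hat, pvDescA_succ_mem tareas atom g t hat]
    · have hδ : pvDelta tareas atom t = pvLp tareas atom (tareas.length + 1) t + 1 := if_neg hat
      rw [pvDescA_succ_not_mem tareas atom f t hat, pvDescA_succ_not_mem tareas atom g t hat]
      refine congrArg List.flatten (List.map_congr_left ?_)
      intro c hc
      obtain ⟨hcr, hclt⟩ := pvMeasure_lt tarea tareas atom hPre t c ht hat hc
      by_cases hac : c ∈ atom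
      · rw [pvDescA_pos_mem tareas atom f (by omega) c hac,
          pvDescA_pos_mem tareas atom g (by omega) c hac]
      · have hδc : pvDelta tareas atom c = pvLp tareas atom (tareas.length + 1) c + 1 := if_neg hac
        exact ih g c hcr (by omega) (by omega)

-- potential of a task and of a stack (pop-count bound for B's loop)
def pvPhi (tareas : List (String × List String)) (atom : List String) (t : String) : Nat :=
  if t ∈ atom then 1
  else (pvMaxKids tareas + 1) ^ (pvLp tareas atom (tareas.length + 1) t + 1)

def pvMu (tareas : List (String × List String)) (atom : List String) (stack : List String) : Nat :=
  (stack.map (pvPhi tareas atom)).sum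

lemma pvOne_le_phi (tareas : List (String × List String)) (atom : List String) (t : String) :
    1 ≤ pvPhi tareas atom t := by
  unfold pvPhi
  split
  · omega
  · exact Nat.one_le_pow _ _ (by omega)

lemma pvSubs_len_le (tareas : List (String × List String)) (t : String) :
    (pvGetSubs tareas t).length ≤ pvMaxKids tareas := by
  unfold pvGetSubs PySem.Dict.getD PySem.Dict.get?
  rcases hfind : tareas.find? (fun p => p.1 == t) with _ | pr
  · simp [hfind]
  · simp only [hfind, Option.map_some, Option.getD_some]
    have hmem : pr ∈ tareas := List.mem_of_find?_eq_some hfind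
    have : pr.2.length ∈ tareas.map (fun p => p.2.length) := List.mem_map_of_mem hmem
    exact (PySem.List.le_foldl_max (tareas.map (fun p => p.2.length)) 0).2 _ this

lemma pvMu_subs_lt (tarea : String) (tareas : List (String × List String))
    (atom : List String) (hPre : Pre_descomponer tarea tareas atom)
    (t : String) (ht : t ∈ pvReachSet tarea tareas atom) (hat : t ∉ atom) :
    pvMu tareas atom (pvGetSubs tareas t) + 1 ≤ pvPhi tareas atom t := by
  set b := pvMaxKids tareas with hb
  set r := pvLp tareas atom (tareas.length + 1) t + 1 with hr
  have hphit : pvPhi tareas atom t = (b + 1) ^ r := if_neg hat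
  have hX : 1 ≤ (b + 1) ^ (r - 1) := Nat.one_le_pow _ _ (by omega)
  have hbound : ∀ x ∈ (pvGetSubs tareas t).map (pvPhi tareas atom), x ≤ (b + 1) ^ (r - 1) := by
    intro x hx
    obtain ⟨c, hcmem, hphix⟩ := List.mem_map.1 hx
    rw [← hphix]
    by_cases hac : c ∈ atom
    · rw [pvPhi, if_pos hac]; exact hX
    · obtain ⟨-, hclt⟩ := pvMeasure_lt tarea tareas atom hPre t c ht hat hcmem
      rw [pvPhi, if_neg hac]
      exact Nat.pow_le_pow_right (by omega) (by omega)
  have hsum : pvMu tareas atom (pvGetSubs tareas t) ≤ (pvGetSubs tareas t).length * (b + 1) ^ (r - 1) := by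
    have := List.sum_le_card_nsmul ((pvGetSubs tareas t).map (pvPhi tareas atom)) ((b + 1) ^ (r - 1)) hbound
    simpa [pvMu, smul_eq_mul] using this
  have hlen : (pvGetSubs tareas t).length ≤ b := pvSubs_len_le tareas t
  have hphi : pvPhi tareas atom t = (b + 1) ^ (r - 1) * (b + 1) := by
    have hr1 : r - 1 + 1 = r := by omega
    rw [hphit]
    conv_lhs => rw [← hr1]
    rw [pow_succ]
  have hmul : (pvGetSubs tareas t).length * (b + 1) ^ (r - 1) ≤ b * (b + 1) ^ (r - 1) :=
    Nat.mul_le_mul_right _ hlen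
  have hsplit : (b + 1) ^ (r - 1) * (b + 1) = b * (b + 1) ^ (r - 1) + (b + 1) ^ (r - 1) := by ring
  omega

lemma pvLoopB_acc (tareas : List (String × List String)) (atom : List String) :
    ∀ f stack acc, pvLoopB tareas atom f stack acc = acc ++ pvLoopB tareas atom f stack [] := by
  intro f
  induction f with
  | zero =>
    intro stack acc
    cases stack <;> simp [pvLoopB]
  | succ f ih =>
    intro stack acc
    rcases stack with _ | ⟨t, rest⟩
    · simp [pvLoopB]
    · simp only [pvLoopB]
      by_cases hat : atom.contains t
      · rw [if_pos hat, if_pos hat, ih rest (acc ++ [t]), ih rest ([] ++ [t])]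
        simp
      · rw [if_neg hat, if_neg hat, ih (pvGetSubs tareas t ++ rest) acc]

lemma pvLoopB_eq (tarea : String) (tareas : List (String × List String))
    (atom : List String) (hPre : Pre_descomponer tarea tareas atom) :
    ∀ f stack, (∀ t ∈ stack, t ∈ pvReachSet tarea tareas atom) →
      pvMu tareas atom stack ≤ f →
      pvLoopB tareas atom f stack [] =
        (stack.map (pvDescA tareas atom (tareas.length + 3))).flatten := by
  intro f
  induction f with
  | zero =>
    intro stack _ hmu
    rcases stack with _ | ⟨t, rest⟩
    · simp [pvLoopB]
    · exfalso
      have h1 := pvOne_le_phi tareas atom t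
      simp [pvMu] at hmu
      omega
  | succ f ih =>
    intro stack hstk hmu
    rcases stack with _ | ⟨t, rest⟩
    · simp [pvLoopB]
    · have ht : t ∈ pvReachSet tarea tareas atom := hstk t (by simp)
      have hrest : ∀ u ∈ rest, u ∈ pvReachSet tarea tareas atom :=
        fun u hu => hstk u (by simp [hu])
      have hmu' : pvPhi tareas atom t + pvMu tareas atom rest ≤ f + 1 := by
        simpa [pvMu] using hmu
      have h1 := pvOne_le_phi tareas atom t
      simp only [pvLoopB]
      by_cases hat : t ∈ atom
      · have hcont : atom.contains t = true := by simpa using hat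
        rw [if_pos hcont, pvLoopB_acc, ih rest hrest (by omega)]
        rw [List.map_cons, List.flatten_cons, pvDescA_pos_mem tareas atom _ (by omega) t hat]
        simp
      · have hcont : ¬ atom.contains t = true := by simpa using hat
        have hmus := pvMu_subs_lt tarea tareas atom hPre t ht hat
        have hsubR : ∀ u ∈ pvGetSubs tareas t ++ rest, u ∈ pvReachSet tarea tareas atom := by
          intro u hu
          rcases List.mem_append.1 hu with hu | hu
          · exact (pvMeasure_lt tarea tareas atom hPre t u ht hat hu).1
          · exact hrest u hu
        have hmuapp : pvMu tareas atom (pvGetSubs tareas t ++ rest) ≤ f := by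
          simp only [pvMu, List.map_append, List.sum_append] at *
          omega
        rw [if_neg hcont, ih (pvGetSubs tareas t ++ rest) hsubR hmuapp]
        rw [List.map_cons, List.flatten_cons, List.map_append, List.flatten_append]
        congr 1
        rw [show tareas.length + 3 = (tareas.length + 2) + 1 from rfl,
          pvDescA_succ_not_mem tareas atom _ t hat]
        refine congrArg List.flatten (List.map_congr_left ?_)
        intro c hc
        obtain ⟨hcr, hclt⟩ := pvMeasure_lt tarea tareas atom hPre t c ht hat hc
        have hle := pvLp_le tareas atom (tareas.length + 1) t
        have hδc : pvDelta tareas atom c ≤ pvLp tareas atom (tareas.length + 1) t := by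
          unfold pvDelta; split
          · omega
          · omega
        exact pvDescA_stab tarea tareas atom hPre _ _ c hcr (by omega) (by omega)

-- ===== VERDICT (by name: the statement is the Claim_ definition above) =====
theorem descomponer_spec : Claim_equal_descomponer := by
  intro tarea tareas atom _hDom hPre
  unfold Spec_descomponer descomponer descomponer_alt
  have hle := pvLp_le tareas atom (tareas.length + 1) tarea
  have hphile : pvPhi tareas atom tarea ≤ (pvMaxKids tareas + 1) ^ (tareas.length + 2) := by
    unfold pvPhi
    split
    · exact Nat.one_le_pow _ _ (by omega)
    · exact Nat.pow_le_pow_right (by omega) (by omega)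
  have hmu : pvMu tareas atom [tarea] ≤ (pvMaxKids tareas + 1) ^ (tareas.length + 2) := by
    simpa [pvMu] using hphile
  rw [pvLoopB_eq tarea tareas atom hPre _ [tarea]
    (by intro u hu; simp at hu; rw [hu]; exact pvTarea_mem_reach tarea tareas atom) hmu]
  simp
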